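-- pv_equiv track=rewrite | github.com/queelius/computational-explorations | src/higher_order_patterns.py | _find_divisibility_chains
-- ===== SOURCE A (Python) =====
-- from typing import Dict, List, Tuple, Set, Any, Optional
--
-- def _find_divisibility_chains(n: int, k: int) -> List[Tuple[int, ...]]:
--     """Find all chains a_1 | a_2 | ... | a_k in [n]."""
--     chains = []
--
--     def extend(chain: List[int]):
--         if len(chain) == k:
--             chains.append(tuple(chain))
--             return
--         last = chain[-1]
--         for mult in range(2, n // last + 1):
--             nxt = last * mult
--             if nxt <= n:
--                 chain.append(nxt)
--                 extend(chain)
--                 chain.pop()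
--
--     for start in range(1, n + 1):
--         extend([start])
--     return chains
-- ===== SOURCE B (Python) =====
-- def _find_divisibility_chains(n, k):
--     """Find all chains a_1 | a_2 | ... | a_k in [n], built level by level."""
--     if k < 1:
--         return []
--     frontier = [[s] for s in range(1, n + 1)]
--     for _ in range(k - 1):
--         if not frontier:
--             break
--         frontier = [c + [c[-1] * m]
--                     for c in frontier
--                     for m in range(2, n // c[-1] + 1)]
--     return [tuple(c) for c in frontier]
-- ===== Notes on version B (the rewrite author's own statement) =====
-- stated objective: alternative
-- what changed: Replaces A's recursive depth-first backtracking (nested `extend` mutating one shared chain) with an iterative bottom-up construction: start from the singleton chains and run k-1 frontier-extension rounds, which yields the same chains in the same lexicographic order.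
import Mathlib
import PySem

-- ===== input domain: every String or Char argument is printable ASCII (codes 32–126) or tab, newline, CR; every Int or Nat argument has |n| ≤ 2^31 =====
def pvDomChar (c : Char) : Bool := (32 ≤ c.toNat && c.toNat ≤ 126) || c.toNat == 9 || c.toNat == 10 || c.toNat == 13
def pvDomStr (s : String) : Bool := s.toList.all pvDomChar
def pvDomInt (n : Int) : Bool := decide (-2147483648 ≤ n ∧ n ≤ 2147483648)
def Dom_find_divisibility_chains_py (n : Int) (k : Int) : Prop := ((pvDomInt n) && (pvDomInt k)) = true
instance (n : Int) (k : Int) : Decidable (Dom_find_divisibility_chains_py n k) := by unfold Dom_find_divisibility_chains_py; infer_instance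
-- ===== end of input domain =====

-- B replaces A's recursive depth-first `extend` by an iterative level-by-level frontier
-- construction (k-1 extension rounds); same return value, a different decomposition.

-- ===== PORT A =====
-- A's inner `extend`, returning the list of chains it appends to `chains`.
-- `chain[-1]` is ported as `getLast?.getD 0`, exact here since every call site passes a
-- nonempty chain. `fuel` only makes the recursion structural: the last element at least
-- doubles on every call while staying within |n|, so with the initial fuel |n|+1 the
-- 0-branch is never reached (pvExtendA_eq_iter / pvExtendA_gt below prove the calls
-- the ports make never exhaust it).
def pvExtendA (n k : Int) : Nat → List Int → List (List Int)
  | 0, _ => []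
  | fuel + 1, chain =>
    if (chain.length : Int) = k then [chain]
    else
      -- `last = chain[-1]` inlined
      (PySem.List.pyRange 2 (PySem.Int.floordiv n (chain.getLast?.getD 0) + 1) 1).flatMap
        (fun m =>
          if chain.getLast?.getD 0 * m ≤ n then
            pvExtendA n k fuel (chain ++ [chain.getLast?.getD 0 * m]) else [])

def find_divisibility_chains_py (n : Int) (k : Int) : List (List Int) :=
  (PySem.List.pyRange 1 (n + 1) 1).foldl
    (fun chains s => chains ++ pvExtendA n k (n.natAbs + 1) [s]) []

-- ===== PORT B =====
-- one extension round over the frontier; `c[-1]` ported as pyGet? c (-1), exact since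
-- every frontier chain is nonempty (the `.getD 0` only totalizes the Option)
def pvStep (n : Int) (frontier : List (List Int)) : List (List Int) :=
  frontier.flatMap (fun c =>
    let last := (PySem.List.pyGet? c (-1)).getD 0
    (PySem.List.pyRange 2 (PySem.Int.floordiv n last + 1) 1).map (fun m => c ++ [last * m]))

-- `for _ in range(k-1): if not frontier: break; frontier = step(frontier)`
def pvIter (n : Int) : Nat → List (List Int) → List (List Int)
  | 0, f => f
  | j + 1, f => if f = [] then f else pvIter n j (pvStep n f)

def find_divisibility_chains_py_alt (n : Int) (k : Int) : List (List Int) :=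
  if k < 1 then []
  else pvIter n (k - 1).toNat ((PySem.List.pyRange 1 (n + 1) 1).map (fun s => [s]))

-- ===== PRECONDITION & SPEC =====
def Spec_find_divisibility_chains_py (n : Int) (k : Int) (out : List (List Int)) : Prop := out = find_divisibility_chains_py_alt n k
instance (n : Int) (k : Int) (out : List (List Int)) : Decidable (Spec_find_divisibility_chains_py n k out) := by unfold Spec_find_divisibility_chains_py; infer_instance

-- ===== CLAIM (what is proved, stated in full; the proofs are below) =====
def Claim_equal_find_divisibility_chains_py : Prop := ∀ (n : Int) (k : Int), Dom_find_divisibility_chains_py n k → Spec_find_divisibility_chains_py n k (find_divisibility_chains_py n k)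

-- ===== LEMMAS AND PROOFS =====

-- range bounds + guard facts for one extension step with a positive last element
theorem pv_step_facts (n last m : Int) (hpos : 1 ≤ last)
    (hm : m ∈ PySem.List.pyRange 2 (PySem.Int.floordiv n last + 1) 1) :
    last * m ≤ n ∧ last < last * m := by
  have h2 := PySem.List.mem_pyRange_one.1 hm
  have h3 := (PySem.Int.le_floordiv_iff_mul_le (a := n) (b := last) (q := m)
    (by omega)).1 (by omega)
  have h4 : m * last = last * m := mul_comm _ _
  have h5 : last * 1 < last * m := mul_lt_mul_of_pos_left (by omega) (by omega)
  omega

theorem pv_pyGet_neg_one (c : List Int) (h : c ≠ []) :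
    PySem.List.pyGet? c (-1) = c.getLast? := by
  have hlen : 1 ≤ c.length := List.length_pos_of_ne_nil h
  simp [PySem.List.pyGet?, PySem.List.pyIdx?, hlen, List.getLast?_eq_getElem?]

theorem pvIter_nil (n : Int) (j : Nat) : pvIter n j [] = [] := by
  cases j <;> rfl

-- the `break` is unobservable: stepping an empty frontier keeps it empty anyway
theorem pvIter_succ (n : Int) (j : Nat) (f : List (List Int)) :
    pvIter n (j + 1) f = pvIter n j (pvStep n f) := by
  rw [pvIter]
  split
  · rename_i h
    rw [h, show pvStep n [] = [] from rfl, pvIter_nil]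
  · rfl

theorem pvIter_append (n : Int) (j : Nat) (l1 l2 : List (List Int)) :
    pvIter n j (l1 ++ l2) = pvIter n j l1 ++ pvIter n j l2 := by
  induction j generalizing l1 l2 with
  | zero => rfl
  | succ j ih =>
    rw [pvIter_succ, pvIter_succ, pvIter_succ,
      show pvStep n (l1 ++ l2) = pvStep n l1 ++ pvStep n l2 by
        simp [pvStep, List.flatMap_append]]
    exact ih _ _

theorem pvIter_flat (n : Int) (j : Nat) (l : List (List Int)) :
    pvIter n j l = l.flatMap (fun c => pvIter n j [c]) := by
  induction l with
  | nil => simp [pvIter_nil]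
  | cons c t ih =>
    have : c :: t = [c] ++ t := rfl
    rw [this, pvIter_append, ih]
    simp

-- DFS from a chain of positive last element (with enough fuel) equals j frontier rounds
-- from that chain alone
theorem pvExtendA_eq_iter (n k : Int) (j : Nat) :
    ∀ (fuel : Nat) (c : List Int) (last : Int), c.getLast? = some last → 1 ≤ last →
      n.natAbs - last.natAbs < fuel → (c.length : Int) + j = k →
      pvExtendA n k fuel c = pvIter n j [c] := by
  induction j with
  | zero =>
    intro fuel c last _ _ hfuel hlen
    match fuel with
    | fuel + 1 => rw [pvExtendA, if_pos (by omega)]; rfl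
  | succ j ih =>
    intro fuel c last hlast hpos hfuel hlen
    have hne : (c.length : Int) ≠ k := by push_cast at hlen ⊢; omega
    have hcne : c ≠ [] := by intro h; rw [h] at hlast; simp at hlast
    match fuel with
    | fuel + 1 =>
      rw [pvExtendA, if_neg hne, hlast]
      simp only [Option.getD_some]
      have hstep : pvStep n [c] =
          (PySem.List.pyRange 2 (PySem.Int.floordiv n last + 1) 1).map
            (fun m => c ++ [last * m]) := by
        simp [pvStep, pv_pyGet_neg_one c hcne, hlast]
      rw [pvIter_succ, hstep,
        pvIter_flat, List.flatMap_map]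
      refine List.flatMap_congr (fun m hm => ?_)
      have hf := pv_step_facts n last m hpos hm
      rw [if_pos hf.1]
      exact ih fuel (c ++ [last * m]) (last * m) (List.getLast?_concat)
        (by omega) (by omega)
        (by simp only [List.length_append, List.length_cons, List.length_nil]
            push_cast at hlen ⊢; omega)

-- when the chain is already longer than k, DFS yields nothing (any fuel)
theorem pvExtendA_gt (n k : Int) :
    ∀ (fuel : Nat) (c : List Int), k < (c.length : Int) → pvExtendA n k fuel c = [] := by
  intro fuel
  induction fuel with
  | zero => intro c _; rfl
  | succ fuel ih =>
    intro c hlen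
    rw [pvExtendA, if_neg (by omega)]
    refine List.flatMap_eq_nil_iff.mpr (fun m hm => ?_)
    split
    · exact ih _ (by simp only [List.length_append, List.length_cons, List.length_nil]
                     push_cast at hlen ⊢; omega)
    · rfl

-- ===== VERDICT (by name: the statement is the Claim_ definition above) =====
theorem find_divisibility_chains_py_spec : Claim_equal_find_divisibility_chains_py := by
  intro n k _
  unfold Spec_find_divisibility_chains_py find_divisibility_chains_py find_divisibility_chains_py_alt
  by_cases hk : k < 1
  · rw [if_pos hk]
    have hA := PySem.List.foldl_congr_mem (PySem.List.pyRange 1 (n + 1) 1)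
      (fun chains s => chains ++ pvExtendA n k (n.natAbs + 1) [s]) (fun chains _ => chains) []
      (fun acc s hs => by
        show acc ++ pvExtendA n k (n.natAbs + 1) [s] = acc
        rw [pvExtendA_gt n k (n.natAbs + 1) [s] (by simp; omega)]
        simp)
    rw [hA, List.foldl_fixed]
  · rw [if_neg hk]
    have hA := PySem.List.foldl_congr_mem (PySem.List.pyRange 1 (n + 1) 1)
      (fun chains s => chains ++ pvExtendA n k (n.natAbs + 1) [s])
      (fun chains s => chains ++ pvIter n (k - 1).toNat [[s]]) []
      (fun acc s hs => by
        have hmem := PySem.List.mem_pyRange_one.1 hs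
        show acc ++ pvExtendA n k (n.natAbs + 1) [s] = acc ++ pvIter n (k - 1).toNat [[s]]
        rw [pvExtendA_eq_iter n k (k - 1).toNat (n.natAbs + 1) [s] s rfl (by omega)
          (by omega) (by simp; omega)])
    rw [hA, PySem.List.foldl_append_eq_flatMap]
    rw [pvIter_flat, List.flatMap_map]
    simp
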